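-- pv_equiv track=rewrite | github.com/vanya-antonov/article-tta-codon | src/riboseq_patrick.py | triple_frames
-- ===== SOURCE A (Python) =====
-- def triple_frames(list_profile) :
--     zero_f = [0 for coordinate66 in range(len(list_profile))]
--     one_f = zero_f[:]
--     two_f = zero_f[:]
--
--     for n70 in range(len(list_profile)) :
--         if n70 %3 == 0 :
--             zero_f[n70] = list_profile[n70]
--         elif  n70 %3 == 1 : one_f[n70] = list_profile[n70]
--         else :two_f[n70] = list_profile[n70]
--     return zero_f, one_f, two_f
-- ===== SOURCE B (Python) =====
-- def triple_frames(list_profile):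
--     zero_f, one_f, two_f = [], [], []
--     n = len(list_profile)
--     i = 0
--     while i + 3 <= n:
--         a, b, c = list_profile[i], list_profile[i + 1], list_profile[i + 2]
--         zero_f += [a, 0, 0]
--         one_f += [0, b, 0]
--         two_f += [0, 0, c]
--         i += 3
--     if n - i == 2:
--         a, b = list_profile[i], list_profile[i + 1]
--         zero_f += [a, 0]
--         one_f += [0, b]
--         two_f += [0, 0]
--     elif n - i == 1:
--         a = list_profile[i]
--         zero_f += [a]
--         one_f += [0]
--         two_f += [0]
--     return zero_f, one_f, two_f
-- ===== Notes on version B (the rewrite author's own statement) =====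
-- stated objective: alternative
-- what changed: B consumes the profile in chunks of three, appending one codon-sized block to each frame per step, instead of A's pre-allocated zero arrays mutated under a per-index mod-3 branch.
import Mathlib
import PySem

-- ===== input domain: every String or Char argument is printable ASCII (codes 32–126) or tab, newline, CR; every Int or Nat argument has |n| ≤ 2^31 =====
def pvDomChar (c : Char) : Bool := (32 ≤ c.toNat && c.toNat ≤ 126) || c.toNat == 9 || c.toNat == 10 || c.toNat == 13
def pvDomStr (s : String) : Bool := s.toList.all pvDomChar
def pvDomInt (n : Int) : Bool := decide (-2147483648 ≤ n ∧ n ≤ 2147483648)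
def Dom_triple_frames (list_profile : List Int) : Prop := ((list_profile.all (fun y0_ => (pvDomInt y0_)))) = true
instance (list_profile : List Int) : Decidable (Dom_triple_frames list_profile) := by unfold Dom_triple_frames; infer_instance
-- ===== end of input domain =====

-- B splits the profile into chunks of three, appending one codon-sized block to each
-- frame per chunk, instead of A's pre-allocated zero arrays mutated under a mod-3 branch.

-- ===== PORT A =====
-- loop body of A's 'for n70 in range(len(list_profile))'
def tfStep (lp : List Int) (s : List Int × List Int × List Int) (n70 : Int) :
    List Int × List Int × List Int :=
  let z := s.1; let o := s.2.1; let t := s.2.2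
  if PySem.Int.mod n70 3 == 0 then
    (z.set n70.toNat ((PySem.List.pyGet? lp n70).getD 0), o, t)
  else if PySem.Int.mod n70 3 == 1 then
    (z, o.set n70.toNat ((PySem.List.pyGet? lp n70).getD 0), t)
  else
    (z, o, t.set n70.toNat ((PySem.List.pyGet? lp n70).getD 0))

def triple_frames (list_profile : List Int) : List Int × List Int × List Int :=
  let zero_f : List Int := (List.range list_profile.length).map (fun _ => 0)
  let one_f := zero_f
  let two_f := zero_f
  (PySem.List.pyRange 0 list_profile.length 1).foldl (tfStep list_profile)
    (zero_f, one_f, two_f)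

-- ===== PORT B =====
def triple_frames_alt : List Int → List Int × List Int × List Int
  | a :: b :: c :: rest =>
      let (z, o, t) := triple_frames_alt rest
      (a :: 0 :: 0 :: z, 0 :: b :: 0 :: o, 0 :: 0 :: c :: t)
  | [a, b] => ([a, 0], [0, b], [0, 0])
  | [a] => ([a], [0], [0])
  | [] => ([], [], [])

-- ===== PRECONDITION & SPEC =====
def Spec_triple_frames (list_profile : List Int) (out : List Int × List Int × List Int) : Prop := out = triple_frames_alt list_profile
instance (list_profile : List Int) (out : List Int × List Int × List Int) : Decidable (Spec_triple_frames list_profile out) := by unfold Spec_triple_frames; infer_instance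

-- ===== CLAIM (what is proved, stated in full; the proofs are below) =====
def Claim_equal_triple_frames : Prop := ∀ (list_profile : List Int), Dom_triple_frames list_profile → Spec_triple_frames list_profile (triple_frames list_profile)

-- ===== LEMMAS AND PROOFS =====

/-- frame `r` of the profile: keep positions ≡ r (mod 3), zero elsewhere. -/
def frame (r : Nat) (lp : List Int) : List Int :=
  (List.range lp.length).map (fun i => if i % 3 = r then lp.getD i 0 else 0)

/-- partial frame after A's loop has processed indices < k. -/
def pfr (r : Nat) (lp : List Int) (k : Nat) : List Int :=
  (List.range lp.length).map (fun i => if i < k ∧ i % 3 = r then lp.getD i 0 else 0)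

lemma pfr_zero (r : Nat) (lp : List Int) :
    pfr r lp 0 = (List.range lp.length).map (fun _ => 0) := by
  unfold pfr
  refine List.map_congr_left (fun i _ => ?_)
  simp

lemma pfr_full (r : Nat) (lp : List Int) : pfr r lp lp.length = frame r lp := by
  unfold pfr frame
  refine List.map_congr_left (fun i hi => ?_)
  simp only [List.mem_range] at hi
  simp [hi]

lemma pfr_set (r : Nat) (lp : List Int) (k : Nat) (hk : k < lp.length) (hr : k % 3 = r) :
    (pfr r lp k).set k (lp.getD k 0) = pfr r lp (k + 1) := by
  unfold pfr
  apply List.ext_getElem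
  · simp
  · intro i h1 h2
    simp only [List.length_set, List.length_map, List.length_range] at h1
    rw [List.getElem_set]
    split_ifs with hik
    · subst hik
      simp [hr, hk]
    · simp only [List.getElem_map, List.getElem_range]
      have : (i < k ∧ i % 3 = r) ↔ (i < k + 1 ∧ i % 3 = r) := by
        constructor
        · rintro ⟨h, h'⟩; exact ⟨by omega, h'⟩
        · rintro ⟨h, h'⟩; exact ⟨by omega, h'⟩
      simp [this]

lemma pfr_skip (r : Nat) (lp : List Int) (k : Nat) (hr : k % 3 ≠ r) :
    pfr r lp k = pfr r lp (k + 1) := by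
  unfold pfr
  refine List.map_congr_left (fun i _ => ?_)
  by_cases hik : i = k
  · subst hik; simp [hr]
  · have : (i < k ∧ i % 3 = r) ↔ (i < k + 1 ∧ i % 3 = r) := by
      constructor
      · rintro ⟨h, h'⟩; exact ⟨by omega, h'⟩
      · rintro ⟨h, h'⟩; exact ⟨by omega, h'⟩
    simp [this]

lemma tfStep_pfr (lp : List Int) (k : Nat) (hk : k < lp.length) :
    tfStep lp (pfr 0 lp k, pfr 1 lp k, pfr 2 lp k) (k : Int)
      = (pfr 0 lp (k + 1), pfr 1 lp (k + 1), pfr 2 lp (k + 1)) := by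
  have hmod : PySem.Int.mod (k : Int) 3 = ((k % 3 : Nat) : Int) := by
    rw [PySem.Int.mod_eq_emod_of_pos (by norm_num : (0:Int) < 3)]
    push_cast
    rfl
  have hget : (PySem.List.pyGet? lp (k : Int)).getD 0 = lp.getD k 0 := by
    rw [PySem.List.pyGet?_natCast]
    simp [List.getD, hk]
  have htn : ((k : Int)).toNat = k := Int.toNat_natCast k
  unfold tfStep
  simp only [hmod, hget, htn]
  have hcases : k % 3 = 0 ∨ k % 3 = 1 ∨ k % 3 = 2 := by omega
  rcases hcases with h | h | h
  · simp [h, pfr_skip 1 lp k (by omega), pfr_skip 2 lp k (by omega)]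
    exact pfr_set 0 lp k hk h
  · simp [h, pfr_skip 0 lp k (by omega), pfr_skip 2 lp k (by omega)]
    exact pfr_set 1 lp k hk h
  · simp [h, pfr_skip 0 lp k (by omega), pfr_skip 1 lp k (by omega)]
    exact pfr_set 2 lp k hk h

lemma loop_inv (lp : List Int) (k : Nat) (hk : k ≤ lp.length) :
    (PySem.List.pyRange 0 (k : Int) 1).foldl (tfStep lp)
      ((List.range lp.length).map (fun _ => 0), (List.range lp.length).map (fun _ => 0),
       (List.range lp.length).map (fun _ => 0))
      = (pfr 0 lp k, pfr 1 lp k, pfr 2 lp k) := by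
  induction k with
  | zero =>
    simp only [Nat.cast_zero, PySem.List.pyRange_one_eq_nil le_rfl, List.foldl_nil]
    rw [pfr_zero 0 lp, pfr_zero 1 lp, pfr_zero 2 lp]
  | succ m ih =>
    have hm : m ≤ lp.length := Nat.le_of_succ_le hk
    have : PySem.List.pyRange 0 ((m : Int) + 1) 1
        = PySem.List.pyRange 0 (m : Int) 1 ++ [(m : Int)] :=
      PySem.List.pyRange_one_succ_right (by positivity)
    push_cast
    rw [this, List.foldl_append, ih hm]
    simp only [List.foldl_cons, List.foldl_nil]
    exact tfStep_pfr lp m (by omega)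

lemma a_eq_frames (lp : List Int) :
    triple_frames lp = (frame 0 lp, frame 1 lp, frame 2 lp) := by
  unfold triple_frames
  simp only
  rw [loop_inv lp lp.length le_rfl]
  rw [pfr_full, pfr_full, pfr_full]

lemma frame_cons3 (r : Nat) (a b c : Int) (rest : List Int) :
    frame r (a :: b :: c :: rest)
      = (if 0 % 3 = r then a else 0) :: (if 1 % 3 = r then b else 0)
        :: (if 2 % 3 = r then c else 0) :: frame r rest := by
  unfold frame
  simp only [List.length_cons]
  rw [List.range_succ_eq_map, List.range_succ_eq_map, List.range_succ_eq_map]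
  simp only [List.map_cons, List.map_map]
  refine congrArg₂ _ rfl (congrArg₂ _ rfl (congrArg₂ _ rfl ?_))
  refine List.map_congr_left (fun i _ => ?_)
  have h3 : (i + 1 + 1 + 1) % 3 = i % 3 := by omega
  simp [Function.comp, h3]

lemma b_eq_frames (lp : List Int) :
    triple_frames_alt lp = (frame 0 lp, frame 1 lp, frame 2 lp) := by
  induction lp using triple_frames_alt.induct with
  | case1 a b c rest z o t hrec ih =>
    rw [show triple_frames_alt (a :: b :: c :: rest)
          = (a :: 0 :: 0 :: (triple_frames_alt rest).1,
             0 :: b :: 0 :: (triple_frames_alt rest).2.1,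
             0 :: 0 :: c :: (triple_frames_alt rest).2.2) from by
      simp [triple_frames_alt]]
    rw [ih, frame_cons3, frame_cons3, frame_cons3]
    simp
  | case2 a b => simp [triple_frames_alt, frame, List.range_succ]
  | case3 a => simp [triple_frames_alt, frame, List.range_succ]
  | case4 => simp [triple_frames_alt, frame]

-- ===== VERDICT (by name: the statement is the Claim_ definition above) =====
theorem triple_frames_spec : Claim_equal_triple_frames := by
  intro lp _
  unfold Spec_triple_frames
  rw [a_eq_frames, b_eq_frames]
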